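-- pv_equiv track=rewrite | github.com/Enjef/Algo | 2200 - 2299/2264 - Largest 3-Same-Digit Number in String/2264 - Largest 3-Same-Digit Number in String.py | largestGoodInteger_2nd_best_speed
-- ===== SOURCE A (Python) =====
-- def largestGoodInteger_2nd_best_speed(num: str) -> str:
--     ans = ''
--     q = ''
--     for char in num:
--         if q == '':
--             q += char
--         else:
--             if char == q[-1]:
--                 q += char
--             else:
--                 q = char
--             if q == 3*q[0]:
--                 if ans == '':
--                     ans = q
--                 else:
--                     if int(q) > int(ans):
--                         ans = q
--     return ans
-- ===== SOURCE B (Python) =====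
-- def largestGoodInteger_2nd_best_speed(num: str) -> str:
--     for d in '9876543210':
--         t = d * 3
--         if t in num:
--             return t
--     return ''
-- ===== Notes on version B (the rewrite author's own statement) =====
-- stated objective: idiomatic
-- what changed: Replaces A's single stateful run-tracking pass (with int() comparisons of candidate triples) by a descending scan over the ten digits that returns the first digit triple found as a substring of num.
-- outside the precondition, e.g. on largestGoodInteger_2nd_best_speed('aaa'): A returns 'aaa', B returns ''; on largestGoodInteger_2nd_best_speed('aaa111'): A raises ValueError, B returns '111'; on largestGoodInteger_2nd_best_speed('ddd'): A returns 'ddd', B returns ''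
import Mathlib
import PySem

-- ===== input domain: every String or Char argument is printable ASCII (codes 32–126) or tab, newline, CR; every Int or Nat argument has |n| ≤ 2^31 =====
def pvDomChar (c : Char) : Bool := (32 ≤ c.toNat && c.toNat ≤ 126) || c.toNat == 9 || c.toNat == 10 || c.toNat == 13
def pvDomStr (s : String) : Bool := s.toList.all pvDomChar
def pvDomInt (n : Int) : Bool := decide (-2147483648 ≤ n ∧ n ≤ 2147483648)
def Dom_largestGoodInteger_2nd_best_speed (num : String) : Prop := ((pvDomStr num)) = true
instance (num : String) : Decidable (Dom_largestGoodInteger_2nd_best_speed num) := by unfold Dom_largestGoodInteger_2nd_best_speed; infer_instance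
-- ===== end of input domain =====

-- B replaces A's one stateful run-tracking pass by an idiomatic descending scan over the ten
-- digits, returning the first triple 'ddd' that is a substring of num; equal results on Pre_.

-- ===== PORT A =====
def pvStepA (st : List Char × List Char) (c : Char) : List Char × List Char :=
  if st.2 = [] then (st.1, st.2 ++ [c])
  else
    -- char == q[-1] : q is nonempty in this branch, so pyGetD is q[-1]
    let q := if c = PySem.List.pyGetD st.2 (-1) ' ' then st.2 ++ [c] else [c]
    -- q == 3*q[0]
    if q = [PySem.List.pyGetD q 0 ' ', PySem.List.pyGetD q 0 ' ', PySem.List.pyGetD q 0 ' '] then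
      if st.1 = [] then (q, q)
      else
        -- int(q) > int(ans); Python raises ValueError when a triple is not numeric — excluded by Pre_
        match PySem.Int.ofChars? q, PySem.Int.ofChars? st.1 with
        | some qi, some ai => if qi > ai then (q, q) else (st.1, q)
        | _, _ => (st.1, q)
    else (st.1, q)

def largestGoodInteger_2nd_best_speed (num : String) : String :=
  String.ofList (num.toList.foldl pvStepA ([], [])).1

-- ===== PORT B =====
def largestGoodInteger_2nd_best_speed_alt (num : String) : String :=
  match "9876543210".toList.find? (fun d => PySem.Str.isIn (String.ofList [d, d, d]) num) with
  | some d => String.ofList [d, d, d]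
  | none => ""

-- ===== PRECONDITION & SPEC =====
-- Pre_ excludes strings containing three consecutive equal NON-digit characters: there A either
-- raises ValueError (int() on a non-numeric triple) or returns a non-digit triple that is not a
-- good integer; B naturally returns the largest digit triple (or '') there.
def Pre_largestGoodInteger_2nd_best_speed (num : String) : Prop :=
  num.toList.all (fun c => c.isDigit || !(PySem.Chars.isIn [c, c, c] num.toList)) = true
instance (num : String) : Decidable (Pre_largestGoodInteger_2nd_best_speed num) := by
  unfold Pre_largestGoodInteger_2nd_best_speed; infer_instance
def pvWitness_largestGoodInteger_2nd_best_speed : String := "773"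

def Spec_largestGoodInteger_2nd_best_speed (num : String) (out : String) : Prop := out = largestGoodInteger_2nd_best_speed_alt num
instance (num : String) (out : String) : Decidable (Spec_largestGoodInteger_2nd_best_speed num out) := by unfold Spec_largestGoodInteger_2nd_best_speed; infer_instance

-- ===== CLAIM (what is proved, stated in full; the proofs are below) =====
def Claim_equal_largestGoodInteger_2nd_best_speed : Prop := ∀ (num : String), Dom_largestGoodInteger_2nd_best_speed num → Pre_largestGoodInteger_2nd_best_speed num → Spec_largestGoodInteger_2nd_best_speed num (largestGoodInteger_2nd_best_speed num)

-- ===== LEMMAS AND PROOFS =====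

-- the digits '9'..'0' B scans
def pvDigits : List Char := "9876543210".toList

-- the best (largest) digit having a triple substring in l
def pvBestD (l : List Char) : Option Char :=
  pvDigits.find? (fun d => decide ([d, d, d] <:+: l))

def pvRenderO : Option Char → List Char
  | none => []
  | some d => [d, d, d]

def pvPreL (l : List Char) : Prop :=
  ∀ c ∈ l, c.isDigit = false → ¬ ([c, c, c] <:+: l)

lemma pv_infix_concat_iff {t l : List Char} {c : Char} :
    t <:+: l ++ [c] ↔ t <:+: l ∨ t <:+ l ++ [c] := by
  constructor
  · rintro ⟨s, u, h⟩
    rcases u.eq_nil_or_concat with rfl | ⟨u', c', rfl⟩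
    · right; exact ⟨s, by simpa using h⟩
    · left
      have h' : (s ++ t ++ u') ++ [c'] = l ++ [c] := by
        simpa [List.append_assoc] using h
      have h2 : s ++ t ++ u' = l := by
        have := congrArg List.dropLast h'
        simpa [List.dropLast_concat] using this
      exact ⟨s, u', h2⟩
  · rintro (h | h)
    · exact h.trans (List.prefix_append l [c]).isInfix
    · exact h.isInfix

lemma pv_suffix3_concat {d c : Char} {l : List Char} :
    [d, d, d] <:+ l ++ [c] ↔ d = c ∧ [d, d] <:+ l := by
  constructor
  · rintro ⟨s, h⟩
    have h' : (s ++ [d, d]) ++ [d] = l ++ [c] := by simpa using h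
    have hdc : d = c := by
      have := congrArg List.getLast? h'
      simpa [List.getLast?_concat] using this
    have h2 : s ++ [d, d] = l := by
      have := congrArg List.dropLast h'
      simpa [List.dropLast_concat] using this
    exact ⟨hdc, ⟨s, h2⟩⟩
  · rintro ⟨rfl, s, hs⟩
    exact ⟨s, by rw [← hs]; simp⟩

lemma pv_find?_congr {α : Type} (ds : List α) (p q : α → Bool)
    (h : ∀ d ∈ ds, p d = q d) : ds.find? p = ds.find? q := by
  induction ds with
  | nil => rfl
  | cons d tl ih =>
    have hd := h d (by simp)
    by_cases hp : p d = true
    · simp [List.find?, hp, hd ▸ hp]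
    · have hq : q d = false := by rw [← hd]; simpa using hp
      simp [List.find?, Bool.eq_false_iff.mpr hp, hq]
      exact ih (fun x hx => h x (by simp [hx]))

-- first hit in a strictly descending list of a disjunctive predicate is the max of the two hits
lemma pv_find?_or_desc (ds : List Char) (p : Char → Bool) (a : Char)
    (hs : ds.Pairwise (fun x y => y.toNat < x.toNat)) (ha : a ∈ ds) :
    ds.find? (fun d => p d || (d == a)) =
      some (match ds.find? p with
            | none => a
            | some b => if a.toNat ≤ b.toNat then b else a) := by
  induction ds with
  | nil => cases ha
  | cons d tl ih =>
    rcases List.pairwise_cons.mp hs with ⟨hd, htl⟩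
    by_cases hp : p d = true
    · have hle : a.toNat ≤ d.toNat := by
        rcases List.mem_cons.mp ha with rfl | hin
        · exact le_rfl
        · exact le_of_lt (hd a hin)
      simp [List.find?, hp, hle]
    · have hpf : p d = false := by simpa using hp
      by_cases hda : d = a
      · subst hda
        have hnone? : ∀ b, tl.find? p = some b → (if d.toNat ≤ b.toNat then b else d) = d := by
          intro b hb
          have hbm := List.mem_of_find?_eq_some hb
          have : b.toNat < d.toNat := hd b hbm
          simp [Nat.not_le.mpr this]
        cases hfb : tl.find? p with
        | none => simp [List.find?, hpf, hfb]
        | some b =>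
          have := hnone? b hfb
          simp [List.find?, hpf, hfb, this]
      · have ha' : a ∈ tl := by
          rcases List.mem_cons.mp ha with rfl | hin
          · exact absurd rfl hda
          · exact hin
        have hne : (d == a) = false := by simpa using hda
        have := ih htl ha'
        simpa [List.find?, hpf, hne] using this

lemma pv_preL_mono {l : List Char} {c : Char} (h : pvPreL (l ++ [c])) : pvPreL l := by
  intro x hx hnd hin
  exact h x (List.mem_append_left _ hx) hnd (hin.trans (List.prefix_append l [c]).isInfix)

lemma pv_bestD_nil : pvBestD [] = none := by
  apply List.find?_eq_none.mpr
  intro d _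
  simp

lemma pv_bestD_singleton (c : Char) : pvBestD [c] = none := by
  apply List.find?_eq_none.mpr
  intro d _
  simp only [decide_eq_true_eq]
  intro h
  have := h.length_le
  simp at this

lemma pv_bestD_congr {l l' : List Char}
    (h : ∀ d, ([d, d, d] <:+: l) ↔ ([d, d, d] <:+: l')) : pvBestD l = pvBestD l' :=
  pv_find?_congr _ _ _ (fun d _ => decide_eq_decide.mpr (h d))

lemma pv_ofChars_triple (c : Char) (hc : c ∈ pvDigits) :
    PySem.Int.ofChars? [c, c, c] = some (111 * ((c.toNat : Int) - 48)) := by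
  have he : pvDigits = ['9','8','7','6','5','4','3','2','1','0'] := by decide
  rw [he] at hc
  fin_cases hc <;> decide

lemma pv_char_eq_of_toNat {c d : Char} (h : c.toNat = d.toNat) : c = d := by
  rcases c with ⟨⟨⟨v, hv⟩⟩, hva⟩
  rcases d with ⟨⟨⟨w, hw⟩⟩, hwa⟩
  simp only [Char.toNat, UInt32.toNat] at h
  simp_all

lemma pv_mem_digits {c : Char} (h : c.isDigit = true) : c ∈ pvDigits := by
  have h1 : 48 ≤ c.toNat ∧ c.toNat ≤ 57 := by
    simp [Char.isDigit] at h
    exact h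
  have h2 : c.toNat = 48 ∨ c.toNat = 49 ∨ c.toNat = 50 ∨ c.toNat = 51 ∨ c.toNat = 52 ∨
      c.toNat = 53 ∨ c.toNat = 54 ∨ c.toNat = 55 ∨ c.toNat = 56 ∨ c.toNat = 57 := by omega
  rcases h2 with h|h|h|h|h|h|h|h|h|h
  · have hx : c = '0' := pv_char_eq_of_toNat (by rw [h]; decide)
    rw [hx]; decide
  · have hx : c = '1' := pv_char_eq_of_toNat (by rw [h]; decide)
    rw [hx]; decide
  · have hx : c = '2' := pv_char_eq_of_toNat (by rw [h]; decide)
    rw [hx]; decide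
  · have hx : c = '3' := pv_char_eq_of_toNat (by rw [h]; decide)
    rw [hx]; decide
  · have hx : c = '4' := pv_char_eq_of_toNat (by rw [h]; decide)
    rw [hx]; decide
  · have hx : c = '5' := pv_char_eq_of_toNat (by rw [h]; decide)
    rw [hx]; decide
  · have hx : c = '6' := pv_char_eq_of_toNat (by rw [h]; decide)
    rw [hx]; decide
  · have hx : c = '7' := pv_char_eq_of_toNat (by rw [h]; decide)
    rw [hx]; decide
  · have hx : c = '8' := pv_char_eq_of_toNat (by rw [h]; decide)
    rw [hx]; decide
  · have hx : c = '9' := pv_char_eq_of_toNat (by rw [h]; decide)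
    rw [hx]; decide

lemma pv_suffix2_getLast {d : Char} {l : List Char} (h : [d, d] <:+ l) :
    l.getLast? = some d := by
  obtain ⟨s, rfl⟩ := h
  have : s ++ [d, d] = (s ++ [d]) ++ [d] := by simp
  rw [this, List.getLast?_concat]

lemma pv_getLast_run {r : List Char} {n : Nat} {a : Char} (hn : 1 ≤ n) :
    (r ++ List.replicate n a).getLast? = some a := by
  obtain ⟨m, rfl⟩ : ∃ m, n = m + 1 := ⟨n - 1, by omega⟩
  rw [List.replicate_succ', ← List.append_assoc, List.getLast?_concat]

lemma pv_rep_suffix {n k : Nat} {a : Char} (h : k ≤ n) :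
    List.replicate k a <:+ List.replicate n a :=
  ⟨List.replicate (n - k) a, by rw [← List.replicate_add]; congr 1; omega⟩

-- how A's step acts on a state whose q is a nonempty constant run
lemma pv_stepA_run (st : List Char × List Char) (c : Char) (n : Nat) (a : Char)
    (hn : 1 ≤ n) (hq : st.2 = List.replicate n a) :
    pvStepA st c =
      if c = a then
        (if n = 2 then
           (if st.1 = [] then ([a, a, a], [a, a, a])
            else match PySem.Int.ofChars? [a, a, a], PySem.Int.ofChars? st.1 with
                 | some qi, some ai => if qi > ai then ([a, a, a], [a, a, a]) else (st.1, [a, a, a])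
                 | _, _ => (st.1, [a, a, a]))
         else (st.1, List.replicate (n + 1) a))
      else (st.1, [c]) := by
  obtain ⟨ans, q⟩ := st
  simp only at hq
  subst hq
  have hne : List.replicate n a ≠ [] := by simp; omega
  unfold pvStepA
  dsimp only
  rw [if_neg hne, PySem.List.pyGetD_neg_one _ _ hne, List.getLast_replicate]
  by_cases hca : c = a
  · subst hca
    rw [if_pos rfl, if_pos rfl, ← List.replicate_succ']
    have hhead : PySem.List.pyGetD (List.replicate (n + 1) c) 0 ' ' = c := by
      rw [List.replicate_succ, PySem.List.pyGetD_zero_cons]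
    rw [hhead]
    by_cases hn2 : n = 2
    · subst hn2
      rw [if_pos rfl, if_pos (by simp [List.replicate])]
      simp [List.replicate]
    · rw [if_neg hn2, if_neg (by
        intro hcon
        have := congrArg List.length hcon
        simp at this
        omega)]
  · rw [if_neg hca, if_neg hca, if_neg (by
      intro hcon
      have := congrArg List.length hcon
      simp at this)]

lemma pv_main : ∀ (l : List Char), pvPreL l →
    (l.foldl pvStepA ([], [])).1 = pvRenderO (pvBestD l) ∧
    ((l = [] ∧ (l.foldl pvStepA ([], [])).2 = []) ∨
      ∃ a n r, 1 ≤ n ∧ (l.foldl pvStepA ([], [])).2 = List.replicate n a ∧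
        l = r ++ List.replicate n a ∧ (∀ x, r.getLast? = some x → x ≠ a)) := by
  intro l
  induction l using List.reverseRecOn with
  | nil =>
    intro _
    exact ⟨by simp [pv_bestD_nil, pvRenderO], Or.inl ⟨rfl, rfl⟩⟩
  | append_singleton l c ih =>
    intro hpre
    obtain ⟨h1, h2⟩ := ih (pv_preL_mono hpre)
    rw [List.foldl_append]
    rcases h2 with ⟨rfl, hq⟩ | ⟨a, n, r, hn, hq, hl, hr⟩
    · -- l = [] : first character, q becomes [c]
      have hnil : ([] : List Char).foldl pvStepA ([], []) = ([], []) := rfl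
      rw [hnil]
      rw [pv_bestD_nil] at h1
      have hst : pvStepA ([], []) c = (([] : List Char), [c]) := by
        unfold pvStepA
        rw [if_pos rfl]
        rfl
      rw [List.foldl_cons, List.foldl_nil, hst]
      constructor
      · simp [pv_bestD_singleton, pvRenderO]
      · exact Or.inr ⟨c, 1, [], le_rfl, by simp, by simp, by simp⟩
    · -- l ends in the run replicate n a
      rw [List.foldl_cons, List.foldl_nil, pv_stepA_run _ c n a hn hq]
      by_cases hca : c = a
      · subst hca
        rw [if_pos rfl]
        by_cases hn3 : n = 2
        · -- the run reaches length exactly 3: the triple [c,c,c] fires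
          subst hn3
          rw [if_pos rfl]
          have hsuff : [c, c, c] <:+ l ++ [c] := by
            refine ⟨r, ?_⟩
            rw [hl]; simp
          have hdig : c.isDigit = true := by
            by_contra hnd
            exact hpre c (by simp) (by simpa using hnd) hsuff.isInfix
          have hcd : c ∈ pvDigits := pv_mem_digits hdig
          have hpred : ∀ d ∈ pvDigits,
              (decide ([d, d, d] <:+: l ++ [c])) =
                ((fun d => decide ([d, d, d] <:+: l)) d || (d == c)) := by
            intro d _
            by_cases hdc : d = c
            · subst hdc
              simp [hsuff.isInfix]
            · have : ([d, d, d] <:+: l ++ [c]) ↔ ([d, d, d] <:+: l) := by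
                rw [pv_infix_concat_iff]
                constructor
                · rintro (h | h)
                  · exact h
                  · exact absurd (pv_suffix3_concat.mp h).1 hdc
                · exact Or.inl
              simp [this, hdc]
          have hbest : pvBestD (l ++ [c]) =
              some (match pvBestD l with
                    | none => c
                    | some b => if c.toNat ≤ b.toNat then b else c) := by
            unfold pvBestD
            rw [pv_find?_congr _ _ _ hpred]
            exact pv_find?_or_desc pvDigits _ c (by decide) hcd
          have hdec : l ++ [c] = r ++ List.replicate 3 c := by
            rw [hl, List.append_assoc, ← List.replicate_succ']
          cases hb : pvBestD l with
          | none =>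
            rw [hb] at h1
            simp only [pvRenderO] at h1
            rw [if_pos h1, hbest, hb]
            exact ⟨rfl, Or.inr ⟨c, 3, r, by omega, rfl, hdec, hr⟩⟩
          | some b =>
            rw [hb] at h1
            simp only [pvRenderO] at h1
            have hbd : b ∈ pvDigits := List.mem_of_find?_eq_some hb
            rw [if_neg (by rw [h1]; simp), h1, pv_ofChars_triple c hcd, pv_ofChars_triple b hbd]
            dsimp only
            rw [hbest, hb]
            dsimp only
            by_cases hgt : b.toNat < c.toNat
            · rw [if_pos (by omega), if_neg (by omega)]
              exact ⟨rfl, Or.inr ⟨c, 3, r, by omega, rfl, hdec, hr⟩⟩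
            · rw [if_neg (by omega), if_pos (by omega)]
              exact ⟨by simp [pvRenderO], Or.inr ⟨c, 3, r, by omega, rfl, hdec, hr⟩⟩
        · -- run length n+1 ≠ 3: no triple fires
          rw [if_neg hn3]
          have hbest : pvBestD (l ++ [c]) = pvBestD l := by
            apply pv_bestD_congr
            intro d
            rw [pv_infix_concat_iff]
            constructor
            · rintro (h | h)
              · exact h
              · obtain ⟨hdc, hdd⟩ := pv_suffix3_concat.mp h
                subst hdc
                rcases Nat.lt_or_ge n 2 with hn1 | hn2
                · -- n = 1 : l ends in a single c, [c,c] cannot be a suffix of l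
                  exfalso
                  obtain ⟨s, hs⟩ := hdd
                  have hn1' : n = 1 := by omega
                  rw [hn1'] at hl
                  have hs' : (s ++ [d]) ++ [d] = l := by simpa using hs
                  rw [← hs'] at hl
                  have : s ++ [d] = r := by
                    have := congrArg List.dropLast hl
                    simpa [List.dropLast_concat] using this
                  exact hr d (by rw [← this, List.getLast?_concat]) rfl
                · -- n ≥ 3 : [c,c,c] is already a suffix of l
                  have hn3' : 3 ≤ n := by omega
                  have : [d, d, d] <:+ l := by
                    rw [hl]
                    exact (pv_rep_suffix hn3').trans (List.suffix_append r _)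
                  exact this.isInfix
            · exact Or.inl
          refine ⟨by rw [hbest, ← h1], Or.inr ⟨c, n + 1, r, by omega, rfl, ?_, hr⟩⟩
          rw [hl, List.append_assoc, ← List.replicate_succ']
      · -- c breaks the run: q resets to [c]
        rw [if_neg hca]
        have hbest : pvBestD (l ++ [c]) = pvBestD l := by
          apply pv_bestD_congr
          intro d
          rw [pv_infix_concat_iff]
          constructor
          · rintro (h | h)
            · exact h
            · obtain ⟨hdc, hdd⟩ := pv_suffix3_concat.mp h
              subst hdc
              exfalso
              have := pv_suffix2_getLast hdd
              rw [hl, pv_getLast_run hn] at this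
              exact hca (Option.some_injective _ this).symm
          · exact Or.inl
        refine ⟨by rw [hbest, ← h1], Or.inr ⟨c, 1, l, le_rfl, by simp, by simp, ?_⟩⟩
        intro x hx
        rw [hl, pv_getLast_run hn] at hx
        rw [← Option.some_injective _ hx]
        exact Ne.symm hca

-- ===== VERDICT (by name: the statement is the Claim_ definition above) =====
theorem largestGoodInteger_2nd_best_speed_spec : Claim_equal_largestGoodInteger_2nd_best_speed := by
  intro num _ hpre
  unfold Spec_largestGoodInteger_2nd_best_speed largestGoodInteger_2nd_best_speed
    largestGoodInteger_2nd_best_speed_alt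
  have hpl : pvPreL num.toList := by
    intro c hc hd
    have := List.all_eq_true.mp hpre c hc
    simp [hd] at this
    exact (PySem.Chars.isIn_eq_false_iff _ _).mp (by simpa using this)
  rw [(pv_main num.toList hpl).1]
  have hfe : (fun d => PySem.Str.isIn (String.ofList [d, d, d]) num) =
      (fun d => decide ([d, d, d] <:+: num.toList)) := by
    funext d
    by_cases h : [d, d, d] <:+: num.toList
    · simp only [h, decide_true]
      exact (PySem.Str.isIn_iff_infix _ _).mpr (by simpa using h)
    · simp only [h, decide_false]
      rw [← Bool.not_eq_true]
      intro hh
      exact h (by simpa using (PySem.Str.isIn_iff_infix _ _).mp hh)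
  rw [hfe]
  have hsc : "9876543210".toList.find? (fun d => decide ([d, d, d] <:+: num.toList)) =
      pvBestD num.toList := rfl
  rw [hsc]
  cases hb : pvBestD num.toList with
  | none => rfl
  | some d => rfl
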